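-- pv_equiv track=rewrite | github.com/imyjimmy/investing-platform | src/investing_platform/services/filesystem_connectors.py | _header_score
-- ===== SOURCE A (Python) =====
-- HEADER_ALIASES: dict[str, tuple[str, ...]] = {
--     "account_id": ("account number", "account #", "account", "account id"),
--     "account_name": ("account name", "registration", "account title", "account description"),
--     "symbol": ("symbol", "ticker", "ticker symbol", "security symbol"),
--     "name": ("description", "security description", "name", "security", "investment name"),
--     "quantity": ("quantity", "qty", "shares", "current quantity"),
--     "price": ("last price", "price", "current price", "mark price", "closing price"),
--     "value": ("current value", "market value", "value", "current market value", "ending value"),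
--     "cost_basis": ("cost basis total", "cost basis", "total cost basis", "book cost", "cost"),
--     "gain_loss": ("gain/loss dollar", "gain loss", "gain/loss", "total gain/loss dollar", "unrealized gain/loss"),
--     "currency": ("currency", "currency code", "iso currency"),
-- }
--
-- def _header_score(cells: list[str]) -> int:
--     normalized = {_normalize_header(cell) for cell in cells if cell.strip()}
--     if not normalized:
--         return -1
--     score = 0
--     for aliases in HEADER_ALIASES.values():
--         if any(_normalize_header(alias) in normalized for alias in aliases):
--             score += 1
--     return score
--
-- def _normalize_header(value: str) -> str:
--     cleaned = value.strip().lower()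
--     return " ".join("".join(character if character.isalnum() else " " for character in cleaned).split())
-- ===== SOURCE B (Python) =====
-- HEADER_ALIASES: dict[str, tuple[str, ...]] = {
--     "account_id": ("account number", "account #", "account", "account id"),
--     "account_name": ("account name", "registration", "account title", "account description"),
--     "symbol": ("symbol", "ticker", "ticker symbol", "security symbol"),
--     "name": ("description", "security description", "name", "security", "investment name"),
--     "quantity": ("quantity", "qty", "shares", "current quantity"),
--     "price": ("last price", "price", "current price", "mark price", "closing price"),
--     "value": ("current value", "market value", "value", "current market value", "ending value"),
--     "cost_basis": ("cost basis total", "cost basis", "total cost basis", "book cost", "cost"),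
--     "gain_loss": ("gain/loss dollar", "gain loss", "gain/loss", "total gain/loss dollar", "unrealized gain/loss"),
--     "currency": ("currency", "currency code", "iso currency"),
-- }
--
--
-- def _normalize_header(value: str) -> str:
--     # single char scan: alphanumeric runs become words, everything else separates
--     words: list[str] = []
--     current: list[str] = []
--     for character in value.strip().lower():
--         if character.isalnum():
--             current.append(character)
--         elif current:
--             words.append("".join(current))
--             current = []
--     if current:
--         words.append("".join(current))
--     return " ".join(words)
--
--
-- # inverted index: normalized alias -> group position in HEADER_ALIASES
-- _ALIAS_INDEX: dict[str, int] = {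
--     _normalize_header(alias): position
--     for position, aliases in enumerate(HEADER_ALIASES.values())
--     for alias in aliases
-- }
--
--
-- def _header_score(cells: list[str]) -> int:
--     matched: set[int] = set()
--     seen = False
--     for cell in cells:
--         if not cell.strip():
--             continue
--         seen = True
--         position = _ALIAS_INDEX.get(_normalize_header(cell))
--         if position is not None:
--             matched.add(position)
--     return len(matched) if seen else -1
-- ===== Notes on version B (the rewrite author's own statement) =====
-- stated objective: alternative
-- what changed: Replaces A's per-call scan over every alias group (re-normalizing all 46 aliases and probing a set of normalized cells) with a precomputed inverted index (normalized alias -> group position) driven by a single pass over the cells that collects matched group positions in a set, and replaces A's map-to-spaces/split/join normalizer with a single character scan that accumulates alphanumeric runs as words.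
import Mathlib
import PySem

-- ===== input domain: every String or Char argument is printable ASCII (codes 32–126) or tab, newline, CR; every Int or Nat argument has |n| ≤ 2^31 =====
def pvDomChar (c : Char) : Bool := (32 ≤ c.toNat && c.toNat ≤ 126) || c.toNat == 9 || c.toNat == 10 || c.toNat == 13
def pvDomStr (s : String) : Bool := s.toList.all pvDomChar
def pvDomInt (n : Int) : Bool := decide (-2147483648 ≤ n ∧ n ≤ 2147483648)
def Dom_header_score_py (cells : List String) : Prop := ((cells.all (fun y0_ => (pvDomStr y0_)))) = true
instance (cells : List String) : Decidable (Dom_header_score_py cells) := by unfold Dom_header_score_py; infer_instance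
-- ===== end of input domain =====

-- B replaces A's alias-group scan (normalize the cells into a set, then probe every alias of every
-- group) by ONE pass over the cells against a precomputed inverted index (normalized alias → group
-- position), collecting matched positions in a set; B's normalizer is also a different algorithm
-- (a single char scan building alphanumeric runs instead of map-to-spaces + split + join).
-- Objective: alternative (a different algorithm and data structure of similar size).

-- ===== PORT A =====
-- HEADER_ALIASES as an association list in source order
def pvHeaderAliases : List (String × List String) :=
  [ ("account_id", ["account number", "account #", "account", "account id"]),
    ("account_name", ["account name", "registration", "account title", "account description"]),
    ("symbol", ["symbol", "ticker", "ticker symbol", "security symbol"]),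
    ("name", ["description", "security description", "name", "security", "investment name"]),
    ("quantity", ["quantity", "qty", "shares", "current quantity"]),
    ("price", ["last price", "price", "current price", "mark price", "closing price"]),
    ("value", ["current value", "market value", "value", "current market value", "ending value"]),
    ("cost_basis", ["cost basis total", "cost basis", "total cost basis", "book cost", "cost"]),
    ("gain_loss", ["gain/loss dollar", "gain loss", "gain/loss", "total gain/loss dollar", "unrealized gain/loss"]),
    ("currency", ["currency", "currency code", "iso currency"]) ]

-- A's _normalize_header; the inner "".join over single characters is String.ofList of the mapped chars (exact)
def pvNormHeader (value : String) : String :=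
  let cleaned := PySem.Str.lower (PySem.Str.strip value)
  PySem.Str.join " " (PySem.Str.split₀ (String.ofList (cleaned.toList.map (fun c => if PySem.Chars.isalnum c then c else ' '))))

def header_score_py (cells : List String) : Int :=
  let normalized : PySem.Set String :=
    PySem.Set.ofList ((cells.filter (fun c => PySem.Str.strip c ≠ "")).map pvNormHeader)
  if normalized = [] then -1
  else pvHeaderAliases.foldl
    (fun score p => if p.2.any (fun a => normalized.contains (pvNormHeader a)) then score + 1 else score) 0

-- ===== PORT B =====
-- B's _normalize_header: one char scan; alphanumeric runs become the words, everything else separates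
def pvNormScan (value : String) : String :=
  let st := (PySem.Str.lower (PySem.Str.strip value)).toList.foldl
    (fun (st : List String × List Char) character =>
      if PySem.Chars.isalnum character then (st.1, st.2 ++ [character])
      else if st.2 ≠ [] then (st.1 ++ [String.ofList st.2], ([] : List Char))
      else st) ([], [])
  let words := if st.2 ≠ [] then st.1 ++ [String.ofList st.2] else st.1
  PySem.Str.join " " words

-- the dict comprehension over enumerate(HEADER_ALIASES.values()): normalized alias → group position
def pvAliasIndex : PySem.Dict String Int :=
  PySem.Dict.ofList ((PySem.List.enumerate pvHeaderAliases 0).flatMap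
    (fun e => e.2.2.map (fun a => (pvNormScan a, e.1))))

def header_score_py_alt (cells : List String) : Int :=
  let r := cells.foldl
    (fun (st : Bool × PySem.Set Int) cell =>
      if PySem.Str.strip cell = "" then st
      else
        (true,
         match pvAliasIndex.get? (pvNormScan cell) with
         | some position => st.2.add position
         | none => st.2)) (false, PySem.Set.empty)
  if r.1 then PySem.Set.len r.2 else -1

-- ===== PRECONDITION & SPEC =====
def Spec_header_score_py (cells : List String) (out : Int) : Prop := out = header_score_py_alt cells
instance (cells : List String) (out : Int) : Decidable (Spec_header_score_py cells out) := by unfold Spec_header_score_py; infer_instance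

-- ===== CLAIM (what is proved, stated in full; the proofs are below) =====
def Claim_equal_header_score_py : Prop := ∀ (cells : List String), Dom_header_score_py cells → Spec_header_score_py cells (header_score_py cells)

-- ===== LEMMAS AND PROOFS =====

-- an alphanumeric char is never whitespace
theorem pv_alnum_not_space (c : Char) (h : PySem.Chars.isalnum c = true) :
    PySem.Chars.isspace c = false := by
  have hA : 'A'.val.toNat = 65 := rfl
  have hZ : 'Z'.val.toNat = 90 := rfl
  have ha : 'a'.val.toNat = 97 := rfl
  have hz : 'z'.val.toNat = 122 := rfl
  have h0 : '0'.val.toNat = 48 := rfl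
  have h9 : '9'.val.toNat = 57 := rfl
  simp only [PySem.Chars.isalnum, PySem.Chars.isalpha, PySem.Chars.isdigit, PySem.Chars.isupper,
    PySem.Chars.islower, PySem.Chars.isspace, Char.le_def, Bool.or_eq_true, Bool.and_eq_true,
    decide_eq_true_eq, UInt32.le_iff_toNat_le, Bool.or_eq_false_iff, Bool.and_eq_false_iff,
    decide_eq_false_iff_not, not_le, Char.toNat, hA, hZ, ha, hz, h0, h9] at *
  omega

-- reference recursion: the alphanumeric runs of a char list (cw = run in progress)
def pvRuns (l : List Char) (cw : List Char) : List (List Char) :=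
  match l with
  | [] => if cw = [] then [] else [cw]
  | c :: rest =>
      if PySem.Chars.isalnum c then pvRuns rest (cw ++ [c])
      else if cw = [] then pvRuns rest [] else cw :: pvRuns rest []

-- A's split₀ over the mapped (non-alnum → ' ') chars computes exactly the alphanumeric runs
theorem pv_go_eq_runs (l : List Char) (cur : List Char) (acc : List (List Char)) :
    PySem.Chars.split₀.go (l.map (fun c => if PySem.Chars.isalnum c then c else ' ')) cur acc
      = acc.reverse ++ pvRuns l cur.reverse := by
  induction l generalizing cur acc with
  | nil =>
    simp only [List.map_nil, PySem.Chars.split₀.go, pvRuns]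
    by_cases h : cur = []
    · simp [h]
    · simp [h, List.reverse_eq_nil_iff]
  | cons c rest ih =>
    simp only [List.map_cons, pvRuns]
    by_cases hc : PySem.Chars.isalnum c = true
    · have hs := pv_alnum_not_space c hc
      simp only [hc, if_true, PySem.Chars.split₀.go, hs]
      simp only [Bool.false_eq_true, if_false]
      rw [ih]
      simp
    · have hs : PySem.Chars.isspace ' ' = true := rfl
      simp only [hc, Bool.false_eq_true, if_false, PySem.Chars.split₀.go, hs, if_true]
      by_cases hcur : cur = []
      · rw [if_pos (by simp [hcur])]
        rw [ih]
        simp [hcur]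
      · rw [if_neg (by simp [List.isEmpty_iff, hcur])]
        rw [ih]
        simp [List.reverse_eq_nil_iff, hcur]

-- B's char-scan fold computes the same runs (as strings)
theorem pv_scanfold_eq_runs (l : List Char) (ws : List String) (cw : List Char) :
    (if (l.foldl
        (fun (st : List String × List Char) character =>
          if PySem.Chars.isalnum character then (st.1, st.2 ++ [character])
          else if st.2 ≠ [] then (st.1 ++ [String.ofList st.2], ([] : List Char))
          else st) (ws, cw)).2 ≠ []
     then (l.foldl
        (fun (st : List String × List Char) character =>
          if PySem.Chars.isalnum character then (st.1, st.2 ++ [character])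
          else if st.2 ≠ [] then (st.1 ++ [String.ofList st.2], ([] : List Char))
          else st) (ws, cw)).1 ++ [String.ofList (l.foldl
        (fun (st : List String × List Char) character =>
          if PySem.Chars.isalnum character then (st.1, st.2 ++ [character])
          else if st.2 ≠ [] then (st.1 ++ [String.ofList st.2], ([] : List Char))
          else st) (ws, cw)).2]
     else (l.foldl
        (fun (st : List String × List Char) character =>
          if PySem.Chars.isalnum character then (st.1, st.2 ++ [character])
          else if st.2 ≠ [] then (st.1 ++ [String.ofList st.2], ([] : List Char))
          else st) (ws, cw)).1)
      = ws ++ (pvRuns l cw).map String.ofList := by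
  induction l generalizing ws cw with
  | nil =>
    simp only [List.foldl_nil, pvRuns]
    by_cases h : cw = [] <;> simp [h]
  | cons c rest ih =>
    simp only [List.foldl_cons, pvRuns]
    by_cases hc : PySem.Chars.isalnum c = true
    · simp only [hc, if_true]
      exact ih ws (cw ++ [c])
    · simp only [hc, Bool.false_eq_true, if_false]
      by_cases hcw : cw = []
      · simp only [hcw, ne_eq, not_true_eq_false, if_false]
        exact ih ws []
      · simp only [ne_eq, hcw, not_false_iff, if_true]
        rw [ih]
        simp

-- the two normalizers agree on every string
theorem pv_norm_eq (value : String) : pvNormScan value = pvNormHeader value := by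
  simp only [pvNormScan, pvNormHeader]
  rw [pv_scanfold_eq_runs]
  simp only [PySem.Str.split₀, PySem.Chars.split₀, String.toList_ofList]
  rw [pv_go_eq_runs _ [] []]
  simp

-- the raw (normalized alias, position) pair list, and the index's items, as literals (kernel-checked)
def pvRawLit : List (String × Int) := [ ("account number", 0),
    ("account", 0), ("account", 0), ("account id", 0),
    ("account name", 1), ("registration", 1), ("account title", 1), ("account description", 1),
    ("symbol", 2), ("ticker", 2), ("ticker symbol", 2), ("security symbol", 2),
    ("description", 3), ("security description", 3), ("name", 3), ("security", 3), ("investment name", 3),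
    ("quantity", 4), ("qty", 4), ("shares", 4), ("current quantity", 4),
    ("last price", 5), ("price", 5), ("current price", 5), ("mark price", 5), ("closing price", 5),
    ("current value", 6), ("market value", 6), ("value", 6), ("current market value", 6), ("ending value", 6),
    ("cost basis total", 7), ("cost basis", 7), ("total cost basis", 7), ("book cost", 7), ("cost", 7),
    ("gain loss dollar", 8), ("gain loss", 8), ("gain loss", 8), ("total gain loss dollar", 8), ("unrealized gain loss", 8),
    ("currency", 9), ("currency code", 9), ("iso currency", 9) ]

def pvIdxLit : List (String × Int) := [ ("account number", 0),
    ("account", 0), ("account id", 0),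
    ("account name", 1), ("registration", 1), ("account title", 1), ("account description", 1),
    ("symbol", 2), ("ticker", 2), ("ticker symbol", 2), ("security symbol", 2),
    ("description", 3), ("security description", 3), ("name", 3), ("security", 3), ("investment name", 3),
    ("quantity", 4), ("qty", 4), ("shares", 4), ("current quantity", 4),
    ("last price", 5), ("price", 5), ("current price", 5), ("mark price", 5), ("closing price", 5),
    ("current value", 6), ("market value", 6), ("value", 6), ("current market value", 6), ("ending value", 6),
    ("cost basis total", 7), ("cost basis", 7), ("total cost basis", 7), ("book cost", 7), ("cost", 7),
    ("gain loss dollar", 8), ("gain loss", 8), ("total gain loss dollar", 8), ("unrealized gain loss", 8),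
    ("currency", 9), ("currency code", 9), ("iso currency", 9) ]

set_option maxRecDepth 40000 in
theorem pv_raw_eq :
    (PySem.List.enumerate pvHeaderAliases 0).flatMap
      (fun e => e.2.2.map (fun a => (pvNormScan a, e.1))) = pvRawLit := by decide

set_option maxRecDepth 40000 in
theorem pv_items_eq : pvAliasIndex.items = pvIdxLit := by
  unfold pvAliasIndex
  rw [pv_raw_eq]
  decide

set_option maxRecDepth 40000 in
theorem pv_mem_lits : (pvIdxLit.all (fun pr => pvRawLit.contains pr) &&
    pvRawLit.all (fun pr => pvIdxLit.contains pr)) = true := by decide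

set_option maxRecDepth 40000 in
theorem pv_idx_keys_nodup : pvAliasIndex.keys.Nodup := by
  have hkeys : pvAliasIndex.keys = pvIdxLit.map Prod.fst := by
    simp only [PySem.Dict.keys, pv_items_eq]
  rw [hkeys]
  decide

-- looking up a normalized string in the index
theorem pv_get?_iff (n : String) (i : Int) :
    pvAliasIndex.get? n = some i ↔
      ∃ e ∈ PySem.List.enumerate pvHeaderAliases 0, i = e.1 ∧ ∃ a ∈ e.2.2, n = pvNormScan a := by
  rw [PySem.Dict.get?_eq_some_iff_mem_items _ _ _ pv_idx_keys_nodup, pv_items_eq]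
  have h := pv_mem_lits
  rw [Bool.and_eq_true, List.all_eq_true, List.all_eq_true] at h
  have hmem : (n, i) ∈ pvIdxLit ↔ (n, i) ∈ pvRawLit := by
    constructor
    · intro hm; simpa using h.1 (n, i) hm
    · intro hm; simpa using h.2 (n, i) hm
  rw [hmem, ← pv_raw_eq]
  constructor
  · intro hm
    rcases List.mem_flatMap.1 hm with ⟨e, he, hpr⟩
    rcases List.mem_map.1 hpr with ⟨a, ha, heq⟩
    injection heq with h1 h2
    exact ⟨e, he, h2.symm, a, ha, h1.symm⟩
  · rintro ⟨e, he, hi, a, ha, hn⟩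
    exact List.mem_flatMap.2 ⟨e, he, List.mem_map.2 ⟨a, ha, by rw [hn, hi]⟩⟩

-- B's fused fold: the seen flag, nodup of matched, and membership in matched
theorem pv_fold_seen (d : PySem.Dict String Int) (cells : List String) (s : Bool) (m : PySem.Set Int) :
    (cells.foldl
      (fun (st : Bool × PySem.Set Int) cell =>
        if PySem.Str.strip cell = "" then st
        else (true,
          match d.get? (pvNormScan cell) with
          | some position => st.2.add position
          | none => st.2)) (s, m)).1
      = (s || cells.any (fun c => !(PySem.Str.strip c == ""))) := by
  induction cells generalizing s m with
  | nil => simp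
  | cons c cs ih =>
    simp only [List.foldl_cons, List.any_cons]
    by_cases hc : PySem.Str.strip c = ""
    · simp only [hc, if_true]
      rw [ih]
      simp
    · simp only [hc, if_false]
      cases h : d.get? (pvNormScan c) <;>
        · simp only [h]
          rw [ih]
          simp [hc]

theorem pv_fold_nodup (d : PySem.Dict String Int) (cells : List String) (s : Bool) (m : PySem.Set Int) (hm : m.Nodup) :
    (cells.foldl
      (fun (st : Bool × PySem.Set Int) cell =>
        if PySem.Str.strip cell = "" then st
        else (true,
          match d.get? (pvNormScan cell) with
          | some position => st.2.add position
          | none => st.2)) (s, m)).2.Nodup := by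
  induction cells generalizing s m with
  | nil => exact hm
  | cons c cs ih =>
    simp only [List.foldl_cons]
    by_cases hc : PySem.Str.strip c = ""
    · simp only [hc, if_true]; exact ih s m hm
    · simp only [hc, if_false]
      cases h : d.get? (pvNormScan c) with
      | none => simp only [h]; exact ih true m hm
      | some i => simp only [h]; exact ih true _ (PySem.Set.nodup_add m i hm)

theorem pv_fold_mem (d : PySem.Dict String Int) (cells : List String) (s : Bool) (m : PySem.Set Int) (i : Int) :
    i ∈ (cells.foldl
      (fun (st : Bool × PySem.Set Int) cell =>
        if PySem.Str.strip cell = "" then st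
        else (true,
          match d.get? (pvNormScan cell) with
          | some position => st.2.add position
          | none => st.2)) (s, m)).2
      ↔ i ∈ m ∨ ∃ c ∈ cells, PySem.Str.strip c ≠ "" ∧ d.get? (pvNormScan c) = some i := by
  induction cells generalizing s m with
  | nil => simp
  | cons c cs ih =>
    simp only [List.foldl_cons]
    by_cases hc : PySem.Str.strip c = ""
    · simp only [hc, if_true]
      rw [ih]
      constructor
      · rintro (hm | ⟨c', hc', hs', hg⟩)
        · exact Or.inl hm
        · exact Or.inr ⟨c', List.mem_cons_of_mem _ hc', hs', hg⟩
      · rintro (hm | ⟨c', hc', hs', hg⟩)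
        · exact Or.inl hm
        · rcases List.mem_cons.1 hc' with rfl | hc'
          · exact absurd hc hs'
          · exact Or.inr ⟨c', hc', hs', hg⟩
    · simp only [hc, if_false]
      cases h : d.get? (pvNormScan c) with
      | none =>
        simp only [h]
        rw [ih]
        constructor
        · rintro (hm | ⟨c', hc', hs', hg⟩)
          · exact Or.inl hm
          · exact Or.inr ⟨c', List.mem_cons_of_mem _ hc', hs', hg⟩
        · rintro (hm | ⟨c', hc', hs', hg⟩)
          · exact Or.inl hm
          · rcases List.mem_cons.1 hc' with rfl | hc'
            · rw [h] at hg; cases hg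
            · exact Or.inr ⟨c', hc', hs', hg⟩
      | some j =>
        simp only [h]
        rw [ih]
        constructor
        · rintro (hm | ⟨c', hc', hs', hg⟩)
          · rcases (PySem.Set.mem_add m j i).1 hm with hm | rfl
            · exact Or.inl hm
            · exact Or.inr ⟨c, List.mem_cons_self, hc, h⟩
          · exact Or.inr ⟨c', List.mem_cons_of_mem _ hc', hs', hg⟩
        · rintro (hm | ⟨c', hc', hs', hg⟩)
          · exact Or.inl ((PySem.Set.mem_add m j i).2 (Or.inl hm))
          · rcases List.mem_cons.1 hc' with rfl | hc'
            · rw [h] at hg; injection hg with hg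
              exact Or.inl ((PySem.Set.mem_add m j i).2 (Or.inr hg.symm))
            · exact Or.inr ⟨c', hc', hs', hg⟩

-- ===== VERDICT (by name: the statement is the Claim_ definition above) =====
set_option maxRecDepth 40000 in
set_option maxHeartbeats 40000000 in
theorem header_score_py_spec : Claim_equal_header_score_py := by
  intro cells _
  unfold Spec_header_score_py
  simp only [header_score_py, header_score_py_alt]
  set N := (cells.filter (fun c => PySem.Str.strip c ≠ "")).map pvNormHeader with hN
  have hseen := pv_fold_seen pvAliasIndex cells false PySem.Set.empty
  simp only [Bool.false_or] at hseen
  have hguard : (cells.any (fun c => !(PySem.Str.strip c == "")) = true) ↔ N ≠ [] := by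
    simp only [hN, ne_eq, List.map_eq_nil_iff, List.filter_eq_nil_iff, List.any_eq_true]
    simp
  by_cases hE : N = []
  · rw [if_pos (by simp [hE, PySem.Set.ofList])]
    have hA : cells.any (fun c => !(PySem.Str.strip c == "")) = false := by
      rw [← Bool.not_eq_true]
      exact fun h => hguard.1 h hE
    rw [hseen, hA]
    simp
  · have hSet : PySem.Set.ofList N ≠ [] := by
      intro h
      rcases List.exists_mem_of_ne_nil _ hE with ⟨x, hx⟩
      have := (PySem.Set.mem_ofList N x).2 hx
      rw [h] at this
      cases this
    rw [if_neg hSet, hseen, hguard.2 hE]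
    conv_lhs => rw [PySem.List.foldl_count_if
      (fun p => p.2.any (fun a => (PySem.Set.ofList N).contains (pvNormHeader a))) pvHeaderAliases 0]
    rw [if_pos rfl]
    have hempnd : ([] : List Int).Nodup := List.nodup_nil
    have hMnodup := pv_fold_nodup pvAliasIndex cells false
      PySem.Set.empty hempnd
    have hMmem := pv_fold_mem pvAliasIndex cells false PySem.Set.empty
    set M := (cells.foldl
        (fun (st : Bool × PySem.Set Int) cell =>
          if PySem.Str.strip cell = "" then st
          else (true,
            match pvAliasIndex.get? (pvNormScan cell) with
            | some position => st.2.add position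
            | none => st.2)) (false, PySem.Set.empty)).2 with hM
    set K := ((PySem.List.enumerate pvHeaderAliases 0).filter
      (fun e => e.2.2.any (fun a => (PySem.Set.ofList N).contains (pvNormHeader a)))).map (fun e => e.1) with hK
    have hKpair : K.Pairwise (· < ·) := by
      rw [hK]
      exact List.pairwise_map.2 ((PySem.List.pairwise_lt_enumerate pvHeaderAliases 0).filter _)
    have hKnodup : K.Nodup := hKpair.imp (fun h => ne_of_lt h)
    have hmemiff : ∀ i, i ∈ M ↔ i ∈ K := by
      intro i
      rw [hMmem i]
      simp only [PySem.Set.empty, List.not_mem_nil, false_or]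
      constructor
      · rintro ⟨c, hc, hsc, hg⟩
        rcases (pv_get?_iff _ _).1 hg with ⟨e, he, hi, a, ha, hna⟩
        rw [hK]
        refine List.mem_map.2 ⟨e, List.mem_filter.2 ⟨he, ?_⟩, hi.symm⟩
        simp only [List.any_eq_true, decide_eq_true_eq]
        refine ⟨a, ha, ?_⟩
        have hcN : pvNormHeader c ∈ N := by
          rw [hN]
          exact List.mem_map.2 ⟨c, List.mem_filter.2 ⟨hc, by simpa using hsc⟩, rfl⟩
        have hac : pvNormHeader a = pvNormHeader c := by
          rw [← pv_norm_eq, ← hna, pv_norm_eq]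
        have hmemN : pvNormHeader a ∈ PySem.Set.ofList N := by
          rw [hac]
          exact (PySem.Set.mem_ofList N (pvNormHeader c)).2 hcN
        simp only [PySem.Set.contains]
        exact List.elem_eq_true_of_mem hmemN
      · intro hiK
        rw [hK] at hiK
        rcases List.mem_map.1 hiK with ⟨e, hef, hie⟩
        rcases List.mem_filter.1 hef with ⟨he, hq⟩
        simp only [List.any_eq_true, decide_eq_true_eq] at hq
        rcases hq with ⟨a, ha, hcont⟩
        have haN : pvNormHeader a ∈ N := by
          have : pvNormHeader a ∈ PySem.Set.ofList N := by
            simpa [PySem.Set.contains] using hcont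
          exact (PySem.Set.mem_ofList N _).1 this
        rw [hN] at haN
        rcases List.mem_map.1 haN with ⟨c, hcf, hceq⟩
        rcases List.mem_filter.1 hcf with ⟨hc, hsc⟩
        refine ⟨c, hc, by simpa using hsc, ?_⟩
        refine (pv_get?_iff _ _).2 ⟨e, he, hie.symm, a, ha, ?_⟩
        rw [pv_norm_eq, pv_norm_eq, hceq]
    have hperm : M.Perm K := (List.perm_ext_iff_of_nodup hMnodup hKnodup).2 hmemiff
    have hcnt : (pvHeaderAliases.countP
        (fun p => p.2.any (fun a => (PySem.Set.ofList N).contains (pvNormHeader a)))) = K.length := by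
      rw [hK, List.length_map, ← List.countP_eq_length_filter]
      conv_lhs => rw [← PySem.List.map_snd_enumerate pvHeaderAliases 0]
      rw [List.countP_map]
      rfl
    rw [hcnt]
    simp [PySem.Set.len, hperm.length_eq]
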